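-- pv_equiv track=rewrite | github.com/yannick-cousin1/python-projects | morpion.py | list_to_formated_string
-- ===== SOURCE A (Python) =====
-- def length(list):             # Little function to return length of a list (or a string)
--     c = 0
--     for i in list:
--         c += 1
--     return c
--
-- def list_to_formated_string(LIST):      # convert a list to a string
--     string = ''                         # It will be use for printing scores
--     fstring = ''                        # The list contains a username in each odd number position of the list
--     c = 0                               # And a number of victory (as a string) in each even number position
--     for i in LIST:
--         string += i
--     for j in range(0,length(string)):
--         if string[j] != '\n':           # If actual char isn't '\n'
--             fstring += string[j]        # add it
--         else:                           # else, actual char is '\n'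
--             c += 1                      # let's increase "c"
--             if c%2 == 0:                # if c is an even number (we are at the number of victory)
--                 fstring += ' victoires\n\n' # add ' victoires\n\n' instead of '\n'
--             else:                       # else, c is an odd number (we are at the username)
--                 fstring += ' : '        # add ' : '
--
--     return fstring                      # At the end, we return the new string (it will be like : 'username : x victoires\n\n')
-- ===== SOURCE B (Python) =====
-- def list_to_formated_string(LIST):      # convert a list to a string
--     parts = ''.join(LIST).split('\n')
--     out = [parts[0]]
--     for i in range(1, len(parts)):
--         out.append(' : ' if i % 2 == 1 else ' victoires\n\n')
--         out.append(parts[i])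
--     return ''.join(out)
-- ===== Notes on version B (the rewrite author's own statement) =====
-- stated objective: faster
-- what changed: Instead of scanning the concatenated string character by character with a newline-parity counter and building the result by per-character string +=, B splits the joined string on '\n' once and rejoins the segments with the two separators chosen by segment-index parity using list append + ''.join.
import Mathlib
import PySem

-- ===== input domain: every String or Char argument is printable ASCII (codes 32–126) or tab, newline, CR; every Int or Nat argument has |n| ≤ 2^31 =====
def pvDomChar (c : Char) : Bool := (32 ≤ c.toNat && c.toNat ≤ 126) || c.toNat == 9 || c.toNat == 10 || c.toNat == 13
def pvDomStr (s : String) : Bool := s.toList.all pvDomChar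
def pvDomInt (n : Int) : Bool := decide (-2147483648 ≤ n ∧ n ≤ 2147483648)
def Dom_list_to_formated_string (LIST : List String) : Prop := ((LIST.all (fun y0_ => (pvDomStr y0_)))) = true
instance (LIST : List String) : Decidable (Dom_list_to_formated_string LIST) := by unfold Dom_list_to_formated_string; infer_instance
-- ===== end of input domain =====

-- B replaces A's per-character scan with a newline-parity counter by split-on-'\n' and rejoin
-- with index-parity separators, avoiding per-character work (objective: faster, measured).

-- ===== PORT A =====
-- Python helper `length`: counts elements with a loop
def pvPyLength (l : List Char) : Int := l.foldl (fun c _ => c + 1) 0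

-- the body of A's second loop (state: fstring as chars, counter c)
def pvStep (st : List Char × Int) (ch : Char) : List Char × Int :=
  if ch ≠ '\n' then (st.1 ++ [ch], st.2)
  else
    let c := st.2 + 1
    if PySem.Int.mod c 2 == 0 then (st.1 ++ " victoires\n\n".toList, c)
    else (st.1 ++ " : ".toList, c)

def list_to_formated_string (LIST : List String) : String :=
  let string := LIST.foldl (fun acc i => acc ++ i) ""
  let cs := string.toList
  let res := (PySem.List.pyRange 0 (pvPyLength cs)).foldl
    (fun st j => pvStep st (PySem.List.pyGetD cs j ' '))   -- string[j]: index always in range(0, len)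
    ([], 0)
  String.ofList res.1

-- ===== PORT B =====
-- separator placed before split-segment i (i ≥ 1)
def pvSep (i : Nat) : List Char := if i % 2 == 1 then " : ".toList else " victoires\n\n".toList

-- the loop `for i in range(1, len(parts)): out.append(sep); out.append(parts[i])`
def pvJoinParts : Nat → List (List Char) → List Char
  | _, [] => []
  | i, p :: rest => pvSep i ++ p ++ pvJoinParts (i + 1) rest

def list_to_formated_string_alt (LIST : List String) : String :=
  let parts := PySem.Chars.splitOn (PySem.Chars.join [] (LIST.map String.toList)) ['\n']
  match parts with
  | [] => ""            -- unreachable: str.split never returns an empty list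
  | p :: rest => String.ofList (p ++ pvJoinParts 1 rest)

-- ===== PRECONDITION & SPEC =====
def Spec_list_to_formated_string (LIST : List String) (out : String) : Prop := out = list_to_formated_string_alt LIST
instance (LIST : List String) (out : String) : Decidable (Spec_list_to_formated_string LIST out) := by unfold Spec_list_to_formated_string; infer_instance

-- ===== CLAIM (what is proved, stated in full; the proofs are below) =====
def Claim_equal_list_to_formated_string : Prop := ∀ (LIST : List String), Dom_list_to_formated_string LIST → Spec_list_to_formated_string LIST (list_to_formated_string LIST)

-- ===== LEMMAS AND PROOFS =====

-- simple reference splitter on '\n'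
def pvSplit1 : List Char → List (List Char)
  | [] => [[]]
  | ch :: rest =>
    if ch = '\n' then [] :: pvSplit1 rest
    else
      match pvSplit1 rest with
      | [] => [[ch]]
      | p :: ps => (ch :: p) :: ps

-- A's scan, written as structural recursion (counter as Nat)
def pvAGo : List Char → Nat → List Char
  | [], _ => []
  | ch :: rest, c =>
    if ch ≠ '\n' then ch :: pvAGo rest c
    else (if (c + 1) % 2 == 0 then " victoires\n\n".toList else " : ".toList) ++ pvAGo rest (c + 1)

lemma pvSplit1_ne_nil (cs : List Char) : pvSplit1 cs ≠ [] := by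
  induction cs with
  | nil => simp [pvSplit1]
  | cons ch rest ih =>
    simp only [pvSplit1]
    split_ifs
    · simp
    · rcases h : pvSplit1 rest with _ | ⟨p, ps⟩ <;> simp

lemma pvPyLength_eq (cs : List Char) : pvPyLength cs = PySem.List.len cs := by
  have h : ∀ (l : List Char) (a : Int), l.foldl (fun c _ => c + 1) a = a + l.length := by
    intro l
    induction l with
    | nil => simp
    | cons x xs ih => intro a; simp [List.foldl_cons, ih]; omega
  simp [pvPyLength, PySem.List.len, h]

lemma pvGo_eq_split1 : ∀ (fuel : Nat) (l cur : List Char) (acc : List (List Char)),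
    l.length < fuel →
    PySem.Chars.splitOn.go ['\n'] fuel l cur acc =
      acc.reverse ++ (match pvSplit1 l with
        | [] => []
        | p :: ps => (cur.reverse ++ p) :: ps) := by
  intro fuel
  induction fuel with
  | zero => intro l cur acc h; omega
  | succ fuel ih =>
    intro l cur acc h
    match l with
    | [] =>
      simp only [PySem.Chars.splitOn.go]
      simp [pvSplit1]
    | ch :: rest =>
      simp only [PySem.Chars.splitOn.go]
      by_cases hch : ch = '\n'
      · subst hch
        rw [if_pos (by simp [List.isPrefixOf])]
        have hdrop : List.drop (['\n'] : List Char).length ('\n' :: rest) = rest := rfl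
        rw [hdrop, ih rest [] _ (by simpa using Nat.lt_of_succ_lt_succ h)]
        simp only [pvSplit1, if_true]
        rcases hs : pvSplit1 rest with _ | ⟨p, ps⟩
        · exact absurd hs (pvSplit1_ne_nil rest)
        · simp
      · rw [if_neg (by simp [List.isPrefixOf, Ne.symm hch])]
        rw [ih rest (ch :: cur) acc (by simpa using Nat.lt_of_succ_lt_succ h)]
        simp only [pvSplit1, if_neg hch]
        rcases hs : pvSplit1 rest with _ | ⟨p, ps⟩
        · exact absurd hs (pvSplit1_ne_nil rest)
        · simp

lemma pvSplitOn_eq_split1 (cs : List Char) :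
    PySem.Chars.splitOn cs ['\n'] = pvSplit1 cs := by
  unfold PySem.Chars.splitOn
  rw [pvGo_eq_split1 (cs.length + 1) cs [] [] (by omega)]
  rcases hs : pvSplit1 cs with _ | ⟨p, ps⟩
  · exact absurd hs (pvSplit1_ne_nil cs)
  · simp

-- the step on a newline, counter a natural number
lemma pvStep_newline (acc : List Char) (n : Nat) :
    pvStep (acc, (n : Int)) '\n'
      = (acc ++ (if (n + 1) % 2 == 0 then " victoires\n\n".toList else " : ".toList),
         ((n + 1 : Nat) : Int)) := by
  have hmod : PySem.Int.mod ((n : Int) + 1) 2 = (((n + 1) % 2 : Nat) : Int) := by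
    exact_mod_cast PySem.Int.mod_natCast (n + 1) 2
  simp only [pvStep, ne_eq, not_true_eq_false, if_false, hmod]
  rcases Nat.mod_two_eq_zero_or_one (n + 1) with hpar | hpar <;>
    simp only [hpar, Nat.cast_zero, Nat.cast_one] <;>
    norm_num [Prod.ext_iff]

-- A's foldl over the characters computes pvAGo (first component)
lemma pvFold_fst (cs : List Char) : ∀ (acc : List Char) (n : Nat),
    (cs.foldl pvStep (acc, (n : Int))).1 = acc ++ pvAGo cs n := by
  induction cs with
  | nil => intro acc n; simp [pvAGo]
  | cons ch rest ih =>
    intro acc n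
    rw [List.foldl_cons]
    by_cases hch : ch = '\n'
    · subst hch
      rw [pvStep_newline, ih _ (n + 1)]
      simp [pvAGo, List.append_assoc]
    · have hstep : pvStep (acc, (n : Int)) ch = (acc ++ [ch], (n : Int)) := by
        simp [pvStep, hch]
      rw [hstep, ih _ n]
      simp [pvAGo, hch, List.append_assoc]

-- A's output characters are the head of the split plus the interleaved tail
lemma pvAGo_eq_parts : ∀ (cs : List Char) (n : Nat) (p : List Char) (ps : List (List Char)),
    pvSplit1 cs = p :: ps → pvAGo cs n = p ++ pvJoinParts (n + 1) ps := by
  intro cs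
  induction cs with
  | nil =>
    intro n p ps h
    simp only [pvSplit1] at h
    cases h
    simp [pvAGo, pvJoinParts]
  | cons ch rest ih =>
    intro n p ps h
    by_cases hch : ch = '\n'
    · subst hch
      simp only [pvSplit1, if_true] at h
      cases h
      simp only [pvAGo, ne_eq, not_true_eq_false, if_false]
      rcases hs : pvSplit1 rest with _ | ⟨q, qs⟩
      · exact absurd hs (pvSplit1_ne_nil rest)
      · rw [ih (n + 1) q qs hs]
        simp only [pvJoinParts, pvSep, List.nil_append]
        rcases Nat.mod_two_eq_zero_or_one (n + 1) with hpar | hpar <;>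
          simp [hpar]
    · rcases hs : pvSplit1 rest with _ | ⟨q, qs⟩
      · exact absurd hs (pvSplit1_ne_nil rest)
      · simp only [pvSplit1, if_neg hch, hs] at h
        injection h with h1 h2
        subst h1; subst h2
        simp only [pvAGo, if_pos (by simpa using hch)]
        rw [ih n q qs hs]
        simp

-- the two joins build the same character list
lemma pvConcat_toList (LIST : List String) :
    (LIST.foldl (fun acc i => acc ++ i) "").toList = (LIST.map String.toList).flatten := by
  have h : ∀ (l : List String) (s : String),
      (l.foldl (fun acc i => acc ++ i) s).toList = s.toList ++ (l.map String.toList).flatten := by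
    intro l
    induction l with
    | nil => simp
    | cons x xs ih => intro s; simp [List.foldl_cons, ih, String.toList_append]
  simpa using h LIST ""

lemma pvJoin_nil (l : List (List Char)) : PySem.Chars.join [] l = l.flatten := by
  simp only [PySem.Chars.join]
  induction l with
  | nil => simp [List.intercalate]
  | cons x xs ih => cases xs <;> simp_all [List.intercalate, List.intersperse]

-- ===== VERDICT (by name: the statement is the Claim_ definition above) =====
theorem list_to_formated_string_spec : Claim_equal_list_to_formated_string := by
  intro LIST _
  unfold Spec_list_to_formated_string
  set cs := (LIST.foldl (fun acc i => acc ++ i) "").toList with hcs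
  rw [show list_to_formated_string LIST
        = String.ofList ((PySem.List.pyRange 0 (pvPyLength cs)).foldl
            (fun st j => pvStep st (PySem.List.pyGetD cs j ' ')) ([], 0)).1 from rfl,
      show list_to_formated_string_alt LIST
        = (match PySem.Chars.splitOn (PySem.Chars.join [] (LIST.map String.toList)) ['\n'] with
           | [] => ""
           | p :: rest => String.ofList (p ++ pvJoinParts 1 rest)) from rfl]
  rw [pvPyLength_eq cs,
     PySem.List.foldl_pyRange_pyGetD cs ' ' pvStep ([], 0) (le_refl (0 : Int))]
  simp only [Int.toNat_zero, List.drop_zero]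
  have hfold := pvFold_fst cs [] 0
  simp only [Nat.cast_zero] at hfold
  rw [hfold, List.nil_append]
  have hjoin : PySem.Chars.join [] (LIST.map String.toList) = cs := by
    rw [pvJoin_nil, hcs, pvConcat_toList]
  rw [hjoin, pvSplitOn_eq_split1 cs]
  rcases hs : pvSplit1 cs with _ | ⟨p, ps⟩
  · exact absurd hs (pvSplit1_ne_nil cs)
  · rw [pvAGo_eq_parts cs 0 p ps hs]
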